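-- pv_equiv track=rewrite | github.com/yangjung-woo/KT-Workspace | KT_coding_masters/2차 코딩마스터즈/high29.py | count_cyclic_permutations
-- ===== SOURCE A (Python) =====
-- MOD = 1000000007
--
-- def mod_exp(base, exp, mod):
--     # 거듭제곱을 효율적으로 계산하는 함수 (모듈러 연산 포함)
--     result = 1
--     while exp > 0:
--         if exp % 2 == 1:
--             result = (result * base) % mod
--         base = (base * base) % mod
--         exp //= 2
--     return result
--
-- def count_cyclic_permutations(N):
--     if N < 3:
--         return 0
--
--     # 전체 순열의 개수는 N!
--     factorial = 1
--     for i in range(1, N + 1):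
--         factorial = (factorial * i) % MOD
--
--     # 비순환 순열의 개수:  2^(N-1) 개
--     non_cyclic = mod_exp(2, N - 1, MOD)
--
--     # 순환 순열의 개수 = 전체 순열 - 비순환 순열
--     result = (factorial - non_cyclic + MOD) % MOD
--
--     return result
-- ===== SOURCE B (Python) =====
-- MOD = 1000000007
--
-- def count_cyclic_permutations(N):
--     # single pass: factorial and 2^(N-1) built together by repeated doubling
--     if N < 3:
--         return 0
--     factorial = 1
--     pow2 = 1
--     for i in range(1, N + 1):
--         factorial = (factorial * i) % MOD
--         if i > 1:
--             pow2 = (pow2 * 2) % MOD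
--     return (factorial - pow2 + MOD) % MOD
-- ===== Notes on version B (the rewrite author's own statement) =====
-- stated objective: simpler
-- what changed: Removed the binary-exponentiation helper mod_exp: B computes 2^(N-1) mod p by linear repeated doubling folded into the single factorial loop, then returns (factorial - pow2 + MOD) % MOD.
import Mathlib
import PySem

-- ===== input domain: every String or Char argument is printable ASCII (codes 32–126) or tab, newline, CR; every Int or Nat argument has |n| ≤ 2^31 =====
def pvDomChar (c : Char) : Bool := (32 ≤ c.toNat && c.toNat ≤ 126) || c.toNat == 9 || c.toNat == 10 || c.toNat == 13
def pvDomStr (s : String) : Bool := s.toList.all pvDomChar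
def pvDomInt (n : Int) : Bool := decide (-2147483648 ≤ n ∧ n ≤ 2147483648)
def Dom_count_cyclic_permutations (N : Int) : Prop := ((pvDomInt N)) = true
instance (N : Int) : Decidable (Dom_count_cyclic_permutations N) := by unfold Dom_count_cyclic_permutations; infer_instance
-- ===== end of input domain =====

-- B replaces the binary-exponentiation helper by linear repeated doubling folded
-- into the factorial loop (objective: simpler — one loop, no helper).

-- ===== PORT A =====
-- while loop of mod_exp: state (result, base, exp), mod fixed
def pvModExpGo (result base exp md : Int) : Int :=
  if _h : exp > 0 then
    pvModExpGo (if PySem.Int.mod exp 2 = 1 then PySem.Int.mod (result * base) md else result)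
      (PySem.Int.mod (base * base) md) (PySem.Int.floordiv exp 2) md
  else result
termination_by exp.toNat
decreasing_by
  rw [PySem.Int.floordiv_eq_ediv_of_pos (by omega : (0:Int) < 2)]
  omega

def mod_exp (base exp md : Int) : Int := pvModExpGo 1 base exp md

def count_cyclic_permutations (N : Int) : Int :=
  if N < 3 then 0
  else
    let factorial :=
      (PySem.List.pyRange 1 (N + 1)).foldl
        (fun f i => PySem.Int.mod (f * i) 1000000007) 1
    let non_cyclic := mod_exp 2 (N - 1) 1000000007
    PySem.Int.mod (factorial - non_cyclic + 1000000007) 1000000007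

-- ===== PORT B =====
def count_cyclic_permutations_alt (N : Int) : Int :=
  if N < 3 then 0
  else
    let st :=
      (PySem.List.pyRange 1 (N + 1)).foldl
        (fun (p : Int × Int) i =>
          (PySem.Int.mod (p.1 * i) 1000000007,
           if 1 < i then PySem.Int.mod (p.2 * 2) 1000000007 else p.2)) (1, 1)
    PySem.Int.mod (st.1 - st.2 + 1000000007) 1000000007

-- ===== PRECONDITION & SPEC =====
def Spec_count_cyclic_permutations (N : Int) (out : Int) : Prop := out = count_cyclic_permutations_alt N
instance (N : Int) (out : Int) : Decidable (Spec_count_cyclic_permutations N out) := by unfold Spec_count_cyclic_permutations; infer_instance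

-- ===== CLAIM (what is proved, stated in full; the proofs are below) =====
def Claim_equal_count_cyclic_permutations : Prop := ∀ (N : Int), Dom_count_cyclic_permutations N → Spec_count_cyclic_permutations N (count_cyclic_permutations N)

-- ===== LEMMAS AND PROOFS =====

-- the invariant of mod_exp's while loop: it computes (result * base^exp) mod p
lemma pvModExpGo_spec (n : Nat) : ∀ (r b : Int), 0 ≤ r → r < 1000000007 →
    pvModExpGo r b (n : Int) 1000000007 = (r * b ^ n) % 1000000007 := by
  induction n using Nat.strong_induction_on with
  | _ n ih =>
    intro r b hr0 hr1
    rw [pvModExpGo]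
    by_cases hn : 0 < n
    · rw [dif_pos (by exact_mod_cast hn : (0:Int) < (n : Int))]
      have hm : PySem.Int.mod ((n:Int)) 2 = ((n % 2 : Nat) : Int) := by
        exact_mod_cast PySem.Int.mod_natCast n 2
      have hd : PySem.Int.floordiv ((n:Int)) 2 = ((n / 2 : Nat) : Int) := by
        exact_mod_cast PySem.Int.floordiv_natCast n 2
      rw [hm, hd]
      simp only [PySem.Int.mod_eq_emod_of_pos (show (0:Int) < 1000000007 by norm_num)]
      have hlt : n / 2 < n := Nat.div_lt_self hn (by omega)
      have hbb : ((b * b) % 1000000007) ^ (n / 2) ≡ (b * b) ^ (n / 2) [ZMOD 1000000007] :=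
        Int.ModEq.pow _ (show (b * b) % 1000000007 ≡ (b * b) [ZMOD 1000000007] from
          Int.emod_emod_of_dvd (b * b) dvd_rfl)
      by_cases hodd : n % 2 = 1
      · rw [if_pos (by exact_mod_cast hodd)]
        rw [ih (n / 2) hlt _ _ (Int.emod_nonneg _ (by norm_num : (1000000007:Int) ≠ 0))
          (Int.emod_lt_of_pos _ (by norm_num : (0:Int) < 1000000007))]
        have h1 : (r * b) % 1000000007 ≡ r * b [ZMOD 1000000007] :=
          show _ % _ = _ % _ from Int.emod_emod_of_dvd (r * b) dvd_rfl
        have := h1.mul hbb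
        rw [Int.ModEq] at this
        rw [this]
        have hb : b ^ n = b ^ (n / 2) * b ^ (n / 2) * b := by
          rw [← pow_add, ← pow_succ]
          congr 1
          omega
        rw [hb, mul_pow]
        ring_nf
      · rw [if_neg (by push_cast; omega : ¬ ((n % 2 : Nat) : Int) = 1)]
        rw [ih (n / 2) hlt _ _ hr0 hr1]
        have := (Int.ModEq.refl r).mul hbb
        rw [Int.ModEq] at this
        rw [this]
        have hb : b ^ n = b ^ (n / 2) * b ^ (n / 2) := by
          rw [← pow_add]
          congr 1
          omega
        rw [hb, mul_pow]
    · rw [dif_neg (by exact_mod_cast hn : ¬ (0:Int) < (n : Int))]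
      have : n = 0 := by omega
      subst this
      simp [Int.emod_eq_of_lt hr0 hr1]

-- the first component of B's paired fold is exactly A's factorial fold
lemma pvFstFold (l : List Int) : ∀ (p : Int × Int),
    (l.foldl (fun (p : Int × Int) i =>
      (PySem.Int.mod (p.1 * i) 1000000007,
       if 1 < i then PySem.Int.mod (p.2 * 2) 1000000007 else p.2)) p).1
    = l.foldl (fun f i => PySem.Int.mod (f * i) 1000000007) p.1 := by
  induction l with
  | nil => intro p; rfl
  | cons x xs ih => intro p; simpa using ih _

-- over a list of elements > 1 the second component doubles once per element
lemma pvSndFold (l : List Int) : ∀ (p : Int × Int), (∀ i ∈ l, 1 < i) →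
    0 ≤ p.2 → p.2 < 1000000007 →
    (l.foldl (fun (p : Int × Int) i =>
      (PySem.Int.mod (p.1 * i) 1000000007,
       if 1 < i then PySem.Int.mod (p.2 * 2) 1000000007 else p.2)) p).2
    = (p.2 * 2 ^ l.length) % 1000000007 := by
  induction l with
  | nil => intro p _ h0 h1; simpa using (Int.emod_eq_of_lt h0 h1).symm
  | cons x xs ih =>
    intro p hmem h0 h1
    simp only [List.foldl_cons, if_pos (hmem x (by simp))]
    rw [ih (PySem.Int.mod (p.1 * x) 1000000007, PySem.Int.mod (p.2 * 2) 1000000007)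
      (fun i hi => hmem i (by simp [hi]))
      (PySem.Int.mod_nonneg _ (by norm_num))
      (PySem.Int.mod_lt _ (by norm_num))]
    simp only [PySem.Int.mod_eq_emod_of_pos (show (0:Int) < 1000000007 by norm_num)]
    have h1' : (p.2 * 2) % 1000000007 ≡ p.2 * 2 [ZMOD 1000000007] :=
      show _ % _ = _ % _ from Int.emod_emod_of_dvd (p.2 * 2) dvd_rfl
    have := h1'.mul (Int.ModEq.refl ((2:Int) ^ xs.length))
    rw [Int.ModEq] at this
    rw [this]
    simp only [List.length_cons]
    congr 1
    rw [pow_succ]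
    ring

lemma pvLenPyRange (a b : Int) (h : a < b) : (PySem.List.pyRange a b).length = (b - a).toNat := by
  simp only [PySem.List.pyRange]
  rw [if_neg (by norm_num), if_pos (by norm_num : (0:Int) < 1), if_pos h]
  simp

lemma pvAllGtOne (N : Int) : ∀ i ∈ PySem.List.pyRange 2 (N + 1), 1 < i := by
  intro i hi
  rw [PySem.List.mem_pyRange_one] at hi
  omega

-- ===== VERDICT (by name: the statement is the Claim_ definition above) =====
theorem count_cyclic_permutations_spec : Claim_equal_count_cyclic_permutations := by
  intro N _
  unfold Spec_count_cyclic_permutations count_cyclic_permutations count_cyclic_permutations_alt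
  by_cases h3 : N < 3
  · simp [h3]
  · rw [if_neg h3, if_neg h3]
    have hN : 3 ≤ N := by omega
    -- A's non_cyclic equals 2^(N-1) mod p
    have hexp : mod_exp 2 (N - 1) 1000000007 = ((2:Int) ^ (N - 1).toNat) % 1000000007 := by
      unfold mod_exp
      have hcast : ((((N - 1).toNat : Nat)) : Int) = N - 1 := Int.toNat_of_nonneg (by omega)
      rw [← hcast, pvModExpGo_spec ((N - 1).toNat) 1 2 (by norm_num) (by norm_num), one_mul]
      simp
    -- B's pair fold: first and second component
    have hcons : PySem.List.pyRange 1 (N + 1) = 1 :: PySem.List.pyRange 2 (N + 1) := by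
      have := PySem.List.pyRange_one_cons (by omega : (1:Int) < N + 1)
      simpa using this
    have hfst := pvFstFold (PySem.List.pyRange 1 (N + 1)) (1, 1)
    have hsnd : ((PySem.List.pyRange 1 (N + 1)).foldl
        (fun (p : Int × Int) i =>
          (PySem.Int.mod (p.1 * i) 1000000007,
           if 1 < i then PySem.Int.mod (p.2 * 2) 1000000007 else p.2)) (1, 1)).2
        = ((2:Int) ^ (N - 1).toNat) % 1000000007 := by
      rw [hcons, List.foldl_cons]
      have hstep : PySem.Int.mod (1:Int) 1000000007 = 1 := by decide
      simp only [hstep, mul_one, if_neg (lt_irrefl (1:Int))]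
      rw [pvSndFold (PySem.List.pyRange 2 (N + 1)) (1, 1) (pvAllGtOne N)
        (by norm_num) (by norm_num)]
      rw [pvLenPyRange 2 (N + 1) (by omega)]
      norm_num
      congr 2
      omega
    simp only [hexp, hfst, hsnd]
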